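-- pv_equiv track=rewrite | github.com/new-life-fch/RAG-ACT | RAG/nq_layer_hparam_search.py | make_selection_strategies
-- ===== SOURCE A (Python) =====
-- from typing import List, Tuple, Dict, Optional
--
-- LAYER_ORDER = [
--     8, 10, 7, 12, 13, 9, 11, 17, 5, 6,
--     22, 24, 30, 26, 21, 4, 29, 3, 25, 23,
--     16, 0, 19, 20, 18, 1, 2, 27, 28, 31,
--     15, 14
-- ]
--
-- def make_selection_strategies(
--     L: int,
--     H: int,
-- ) -> Dict[str, List[Tuple[int, int]]]:
--     strategies: Dict[str, List[Tuple[int, int]]] = {}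
--
--     # 仅保留 Top-k 层干预策略
--     # k 从 1 到 len(LAYER_ORDER)
--     for k in range(1, len(LAYER_ORDER) + 1):
--         top_layers = LAYER_ORDER[:k]
--         # 选择这些层的所有头
--         selected_heads = []
--         for l in top_layers:
--             for h in range(H):
--                 selected_heads.append((l, h))
--         strategies[f'top_{k}_layers'] = selected_heads
--
--     return strategies
-- ===== SOURCE B (Python) =====
-- from typing import List, Tuple, Dict, Optional
--
-- LAYER_ORDER = [
--     8, 10, 7, 12, 13, 9, 11, 17, 5, 6,
--     22, 24, 30, 26, 21, 4, 29, 3, 25, 23,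
--     16, 0, 19, 20, 18, 1, 2, 27, 28, 31,
--     15, 14
-- ]
--
-- def make_selection_strategies(
--     L: int,
--     H: int,
-- ) -> Dict[str, List[Tuple[int, int]]]:
--     # Incremental: extend the previous prefix's head list by one layer's heads.
--     strategies: Dict[str, List[Tuple[int, int]]] = {}
--     heads: List[Tuple[int, int]] = []
--     for k, l in enumerate(LAYER_ORDER, 1):
--         heads = heads + [(l, h) for h in range(H)]
--         strategies[f'top_{k}_layers'] = heads
--     return strategies
-- ===== Notes on version B (the rewrite author's own statement) =====
-- stated objective: faster
-- what changed: B makes one pass over LAYER_ORDER, extending the previous prefix's head list by one layer's heads per step (enumerate + reuse), instead of re-slicing LAYER_ORDER and rebuilding every top-k head list from scratch for each k.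
import Mathlib
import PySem

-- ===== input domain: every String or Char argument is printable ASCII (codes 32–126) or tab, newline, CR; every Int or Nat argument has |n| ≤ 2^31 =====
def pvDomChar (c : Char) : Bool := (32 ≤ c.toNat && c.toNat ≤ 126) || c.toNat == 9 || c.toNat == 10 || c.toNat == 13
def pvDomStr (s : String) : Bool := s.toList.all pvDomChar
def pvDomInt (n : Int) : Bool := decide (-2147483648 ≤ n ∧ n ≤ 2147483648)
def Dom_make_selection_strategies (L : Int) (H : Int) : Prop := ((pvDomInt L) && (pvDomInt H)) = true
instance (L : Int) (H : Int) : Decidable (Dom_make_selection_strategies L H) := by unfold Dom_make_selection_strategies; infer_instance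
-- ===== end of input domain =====

-- B rebuilds each top-k head list incrementally by extending the previous prefix once per layer
-- (one pass over LAYER_ORDER) instead of re-deriving every prefix from scratch; objective: faster.

-- the module constant LAYER_ORDER (shared by both programs)
def pvLayerOrder : List Int :=
  [8, 10, 7, 12, 13, 9, 11, 17, 5, 6,
   22, 24, 30, 26, 21, 4, 29, 3, 25, 23,
   16, 0, 19, 20, 18, 1, 2, 27, 28, 31,
   15, 14]

-- ===== PORT A =====
def make_selection_strategies (L : Int) (H : Int) : List (String × List (Int × Int)) :=
  ((PySem.List.pyRange 1 ((pvLayerOrder.length : Int) + 1) 1).foldl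
    (fun (strategies : PySem.Dict String (List (Int × Int))) k =>
      let top_layers := PySem.List.slice pvLayerOrder none (some k)
      let selected_heads := top_layers.foldl
        (fun acc l => (PySem.List.pyRange 0 H 1).foldl (fun acc2 h => acc2 ++ [(l, h)]) acc) []
      strategies.insert ("top_" ++ PySem.Int.toStr k ++ "_layers") selected_heads)
    PySem.Dict.empty).items

-- ===== PORT B =====
def make_selection_strategies_alt (L : Int) (H : Int) : List (String × List (Int × Int)) :=
  ((PySem.List.enumerate pvLayerOrder 1).foldl
    (fun (st : PySem.Dict String (List (Int × Int)) × List (Int × Int)) kl =>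
      let heads := st.2 ++ (PySem.List.pyRange 0 H 1).map (fun h => (kl.2, h))
      (st.1.insert ("top_" ++ PySem.Int.toStr kl.1 ++ "_layers") heads, heads))
    (PySem.Dict.empty, ([] : List (Int × Int)))).1.items

-- ===== PRECONDITION & SPEC =====
def Spec_make_selection_strategies (L : Int) (H : Int) (out : List (String × List (Int × Int))) : Prop := out = make_selection_strategies_alt L H
instance (L : Int) (H : Int) (out : List (String × List (Int × Int))) : Decidable (Spec_make_selection_strategies L H out) := by unfold Spec_make_selection_strategies; infer_instance

-- ===== CLAIM (what is proved, stated in full; the proofs are below) =====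
def Claim_equal_make_selection_strategies : Prop := ∀ (L : Int) (H : Int), Dom_make_selection_strategies L H → Spec_make_selection_strategies L H (make_selection_strategies L H)

-- ===== LEMMAS AND PROOFS =====

-- the items list B's loop produces, starting from accumulated prefix `prev`
def pvBItems (H : Int) : List (Int × Int) → List (Int × Int) → List (String × List (Int × Int))
  | [], _ => []
  | (k, l) :: es, prev =>
      ("top_" ++ PySem.Int.toStr k ++ "_layers",
        prev ++ (PySem.List.pyRange 0 H 1).map (fun h => (l, h))) ::
      pvBItems H es (prev ++ (PySem.List.pyRange 0 H 1).map (fun h => (l, h)))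

lemma pvFlattenMapSingleton {α β : Type} (f : α → β) (l : List α) :
    (l.map (fun x => [f x])).flatten = l.map f := by
  induction l with
  | nil => rfl
  | cons x l ih => simp [ih]

lemma pvB_fold (H : Int) (es : List (Int × Int))
    (d : PySem.Dict String (List (Int × Int))) (prev : List (Int × Int))
    (hfresh : ∀ p ∈ es, d.contains ("top_" ++ PySem.Int.toStr p.1 ++ "_layers") = false)
    (hnd : (es.map (fun p => "top_" ++ PySem.Int.toStr p.1 ++ "_layers")).Nodup) :
    ((es.foldl
      (fun (st : PySem.Dict String (List (Int × Int)) × List (Int × Int)) kl =>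
        let heads := st.2 ++ (PySem.List.pyRange 0 H 1).map (fun h => (kl.2, h))
        (st.1.insert ("top_" ++ PySem.Int.toStr kl.1 ++ "_layers") heads, heads))
      (d, prev)).1).items = d.items ++ pvBItems H es prev := by
  induction es generalizing d prev with
  | nil => simp [pvBItems]
  | cons p es ih =>
    obtain ⟨k, l⟩ := p
    simp only [List.foldl_cons, List.map_cons, List.nodup_cons] at *
    rw [ih _ _ ?_ hnd.2]
    · rw [PySem.Dict.items_insert_of_not_contains _ _ (hfresh _ List.mem_cons_self)]
      simp [pvBItems]
    · intro q hq
      rw [PySem.Dict.contains_insert]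
      have hne : ("top_" ++ PySem.Int.toStr q.1 ++ "_layers") ≠ ("top_" ++ PySem.Int.toStr k ++ "_layers") := by
        intro h; exact hnd.1 (h ▸ List.mem_map_of_mem hq)
      simp [hne, hfresh _ (List.mem_cons_of_mem _ hq)]

-- ===== VERDICT (by name: the statement is the Claim_ definition above) =====
theorem make_selection_strategies_spec : Claim_equal_make_selection_strategies := by
  intro L H _
  unfold Spec_make_selection_strategies make_selection_strategies make_selection_strategies_alt
  rw [PySem.Dict.items_foldl_insert_fresh
        (k := fun k => "top_" ++ PySem.Int.toStr k ++ "_layers")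
        (v := fun k => (PySem.List.slice pvLayerOrder none (some k)).foldl
          (fun acc l => (PySem.List.pyRange 0 H 1).foldl (fun acc2 h => acc2 ++ [(l, h)]) acc) [])
        _ _ (by intro a _; exact PySem.Dict.contains_empty _) (by decide),
      pvB_fold H _ _ _ (by intro p _; exact PySem.Dict.contains_empty _) (by decide)]
  rw [show PySem.List.pyRange 1 ((pvLayerOrder.length : Int) + 1) 1
        = [1,2,3,4,5,6,7,8,9,10,11,12,13,14,15,16,17,18,19,20,21,22,23,24,25,26,27,28,29,30,31,32] from by decide]
  rw [show (PySem.Dict.empty : PySem.Dict String (List (Int × Int))).items = [] from rfl]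
  simp only [List.nil_append]
  simp [pvBItems, pvLayerOrder, PySem.List.enumerate, PySem.List.slice,
        PySem.List.clampIdx, pvFlattenMapSingleton,
        List.append_assoc]
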